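-- pv_equiv track=rewrite | github.com/divyamehtaoo7/-The-Art-of-ShadowOps-Steganographic-Warfare-and-Sentinel-Deployment- | Week 1: Python & Cryptography Assignment 2/elgamal.py | check
-- ===== SOURCE A (Python) =====
-- def check(a,b):
--   t=0
--   n=0
--   m=0
--   h=0
--   j=0
--   while h<a:
--     j=j+h
--     h=h+1
--
--   while t<a-1:
--     m=pow(b,t)
--     n=n+(m%a)
--     t=t+1
--
--   if n==j:
--     return True
--   return False
-- ===== SOURCE B (Python) =====
-- def check(a, b):
--     if a < 2:
--         return True  # both loops are empty: 0 == 0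
--     total = 0
--     cur = 1 % a
--     for _ in range(a - 1):
--         total += cur
--         cur = cur * b % a
--     return total == a * (a - 1) // 2
-- ===== Notes on version B (the rewrite author's own statement) =====
-- stated objective: faster
-- what changed: Replaces the triangular-number loop by the closed form a*(a-1)//2 and the per-term bignum pow(b,t)%a by a running modular product cur=cur*b%a, so every intermediate stays below a.
import Mathlib
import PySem

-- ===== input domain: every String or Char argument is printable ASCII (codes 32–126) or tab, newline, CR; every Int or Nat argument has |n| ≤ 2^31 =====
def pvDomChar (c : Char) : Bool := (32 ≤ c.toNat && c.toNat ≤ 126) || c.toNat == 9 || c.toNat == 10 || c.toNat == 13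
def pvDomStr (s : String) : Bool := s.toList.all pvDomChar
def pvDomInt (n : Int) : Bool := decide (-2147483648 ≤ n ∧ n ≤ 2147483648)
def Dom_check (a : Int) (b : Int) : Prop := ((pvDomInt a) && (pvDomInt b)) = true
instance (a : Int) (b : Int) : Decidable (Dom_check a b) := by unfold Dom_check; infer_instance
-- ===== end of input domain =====

-- B replaces the O(a^2)-bignum loops of A by a running modular product and the closed form a*(a-1)//2 (faster); return value only, no mutation.

-- ===== PORT A =====
-- first while loop: j accumulates 0+1+...+(a-1)
def checkLoop1 (a : Int) (h : Int) (j : Int) : Int :=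
  if h < a then checkLoop1 a (h + 1) (j + h) else j
termination_by (a - h).toNat
decreasing_by omega

-- second while loop: n accumulates pow(b,t) % a for t = 0 .. a-2
def checkLoop2 (a : Int) (b : Int) (t : Int) (n : Int) : Int :=
  if t < a - 1 then checkLoop2 a b (t + 1) (n + PySem.Int.mod (b ^ t.toNat) a) else n
termination_by (a - 1 - t).toNat
decreasing_by omega

def check (a : Int) (b : Int) : Bool :=
  let j := checkLoop1 a 0 0
  let n := checkLoop2 a b 0 0
  if n = j then true else false

-- ===== PORT B =====
def check_alt (a : Int) (b : Int) : Bool :=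
  if a < 2 then true
  else
    (((List.range (a - 1).toNat).foldl
      (fun (p : Int × Int) _ => (p.1 + p.2, PySem.Int.mod (p.2 * b) a))
      (0, PySem.Int.mod 1 a)).1 = PySem.Int.floordiv (a * (a - 1)) 2 : Bool)

-- ===== PRECONDITION & SPEC =====
def Spec_check (a : Int) (b : Int) (out : Bool) : Prop := out = check_alt a b
instance (a : Int) (b : Int) (out : Bool) : Decidable (Spec_check a b out) := by unfold Spec_check; infer_instance

-- ===== CLAIM (what is proved, stated in full; the proofs are below) =====
def Claim_equal_check : Prop := ∀ (a : Int) (b : Int), Dom_check a b → Spec_check a b (check a b)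

-- ===== LEMMAS AND PROOFS =====

def pvStep (a b : Int) (p : Int × Int) : Int × Int := (p.1 + p.2, PySem.Int.mod (p.2 * b) a)

theorem pvFold_eq_iterate (a b : Int) (m : Nat) (s : Int × Int) :
    (List.range m).foldl (fun (p : Int × Int) _ => (p.1 + p.2, PySem.Int.mod (p.2 * b) a)) s
      = (pvStep a b)^[m] s := by
  induction m generalizing s with
  | zero => simp
  | succ k ih =>
    rw [List.range_succ, List.foldl_append, ih, Function.iterate_succ_apply']
    rfl

theorem pvLoop1_char (a : Int) (ha : 2 ≤ a) :
    ∀ (m : Nat) (h j : Int), 0 ≤ h → h ≤ a → (a - h).toNat = m →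
      2 * checkLoop1 a h j = 2 * j + a * (a - 1) - h * (h - 1) := by
  intro m
  induction m with
  | zero =>
    intro h j h0 hle hm
    have : ¬ h < a := by omega
    rw [checkLoop1, if_neg this]
    have : h = a := by omega
    subst this; ring
  | succ k ih =>
    intro h j h0 hle hm
    have hlt : h < a := by omega
    rw [checkLoop1, if_pos hlt]
    have := ih (h + 1) (j + h) (by omega) (by omega) (by omega)
    linarith [this]

theorem pvMod_pow_step (a b : Int) (ha : 0 < a) (x : Int) :
    PySem.Int.mod (PySem.Int.mod x a * b) a = PySem.Int.mod (x * b) a := by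
  simp only [PySem.Int.mod_eq_emod_of_pos ha]
  rw [Int.mul_emod, Int.emod_emod_of_dvd x dvd_rfl, ← Int.mul_emod]

theorem pvLoop2_char (a b : Int) (ha : 2 ≤ a) :
    ∀ (m : Nat) (t n : Int), 0 ≤ t → (a - 1 - t).toNat = m →
      checkLoop2 a b t n = ((pvStep a b)^[m] (n, PySem.Int.mod (b ^ t.toNat) a)).1 := by
  intro m
  induction m with
  | zero =>
    intro t n h0 hm
    have : ¬ t < a - 1 := by omega
    rw [checkLoop2, if_neg this]
    simp
  | succ k ih =>
    intro t n h0 hm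
    have hlt : t < a - 1 := by omega
    rw [checkLoop2, if_pos hlt, Function.iterate_succ_apply]
    have h2 : (t + 1).toNat = t.toNat + 1 := by omega
    have hstep : pvStep a b (n, PySem.Int.mod (b ^ t.toNat) a)
        = (n + PySem.Int.mod (b ^ t.toNat) a, PySem.Int.mod (b ^ (t + 1).toNat) a) := by
      simp [pvStep, h2, pow_succ, pvMod_pow_step a b (by omega : (0:Int) < a)]
    rw [hstep]
    exact ih (t + 1) (n + PySem.Int.mod (b ^ t.toNat) a) (by omega) (by omega)

theorem pvLoop1_small (a : Int) (ha : a < 2) : checkLoop1 a 0 0 = 0 := by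
  by_cases h1 : a = 1
  · subst h1
    rw [checkLoop1]; norm_num
    rw [checkLoop1]; norm_num
  · rw [checkLoop1, if_neg (by omega)]

theorem pvLoop2_small (a b : Int) (ha : a < 2) : checkLoop2 a b 0 0 = 0 := by
  rw [checkLoop2, if_neg (by omega)]

-- ===== VERDICT (by name: the statement is the Claim_ definition above) =====
theorem check_spec : Claim_equal_check := by
  intro a b _
  unfold Spec_check check check_alt
  by_cases ha : a < 2
  · rw [if_pos ha, pvLoop1_small a ha, pvLoop2_small a b ha]
    simp
  · have ha : 2 ≤ a := by omega
    have h1 : 2 * checkLoop1 a 0 0 = a * (a - 1) :=  by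
      have := pvLoop1_char a ha ((a - 0).toNat) 0 0 le_rfl (by omega) rfl
      linarith [this]
    have hj : checkLoop1 a 0 0 = PySem.Int.floordiv (a * (a - 1)) 2 := by
      rw [PySem.Int.floordiv_eq_ediv_of_pos (by omega : (0:Int) < 2), ← h1]
      omega
    have hn : checkLoop2 a b 0 0
        = ((pvStep a b)^[(a - 1).toNat] (0, PySem.Int.mod 1 a)).1 := by
      have := pvLoop2_char a b ha ((a - 1 - 0).toNat) 0 0 le_rfl rfl
      simpa using this
    rw [if_neg (show ¬ a < 2 by omega), pvFold_eq_iterate, ← hn, ← hj]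
    by_cases h : checkLoop2 a b 0 0 = checkLoop1 a 0 0 <;> simp [h]
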